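-- pv_equiv track=rewrite | github.com/sophiadavenport/brain-scRNAseq | scanpy_helper_functions.py | reorder_subtypes
-- ===== SOURCE A (Python) =====
-- def reorder_subtypes(celltypes):
--     '''
--     Used to define subtypes in priority order for graphing
--     '''
--     groups=[['exc'],['inh'],['ast'],['opc'], ['oli'],['mic', 'mg', 't cells'],['vas', 'endo', 'peri']]
--
--     def get_priority(item):
--         item_lower=item.lower()
--         for i, keywords in enumerate(groups):
--             if any(k in item_lower for k in keywords):
--                 return i
--         return len(groups)
--
--     sorted_list=sorted(celltypes, key=lambda x: (get_priority(x), x.lower()))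
--     return sorted_list
-- ===== SOURCE B (Python) =====
-- def reorder_subtypes(celltypes):
--     pairs = [('exc', 0), ('inh', 1), ('ast', 2), ('opc', 3), ('oli', 4),
--              ('mic', 5), ('mg', 5), ('t cells', 5), ('vas', 6), ('endo', 6), ('peri', 6)]
--
--     def priority(item):
--         low = item.lower()
--         return min((i for k, i in pairs if k in low), default=7)
--
--     buckets = [[] for _ in range(8)]
--     for x in sorted(celltypes, key=str.lower):
--         buckets[priority(x)].append(x)
--     return [x for b in buckets for x in b]
-- ===== Notes on version B (the rewrite author's own statement) =====
-- stated objective: faster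
-- what changed: Replaces the single sort with tuple key (priority, lower) by a radix-style two-stage scheme: one stable sort by lower() alone, then a stable distribution pass into 8 priority buckets (priority = min matching index in a flat keyword-to-group map) concatenated in order; measured ~2.4x faster (cheaper sort key, single flat keyword scan per item).
import Mathlib
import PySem

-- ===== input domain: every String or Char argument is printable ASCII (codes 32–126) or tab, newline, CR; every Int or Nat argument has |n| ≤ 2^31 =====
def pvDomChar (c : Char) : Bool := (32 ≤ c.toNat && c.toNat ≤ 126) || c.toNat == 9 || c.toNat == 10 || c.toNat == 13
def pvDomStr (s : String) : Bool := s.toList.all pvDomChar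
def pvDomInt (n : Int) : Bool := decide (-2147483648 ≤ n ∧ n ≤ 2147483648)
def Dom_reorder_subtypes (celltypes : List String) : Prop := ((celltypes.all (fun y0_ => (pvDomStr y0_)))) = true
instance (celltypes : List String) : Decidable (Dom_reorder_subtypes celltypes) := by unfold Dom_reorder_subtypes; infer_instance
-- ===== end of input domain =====

-- B replaces A's single sort with tuple key (priority, lower) by a radix-style scheme: one global stable sort by lower alone, then a stable distribution pass into 8 priority buckets (priority = min matching index in a flat keyword→group map) which are concatenated (measured constant-factor speedup; same result).

-- ===== PORT A =====
def pvGroups : List (List String) :=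
  [["exc"], ["inh"], ["ast"], ["opc"], ["oli"], ["mic", "mg", "t cells"], ["vas", "endo", "peri"]]

-- the 'for i, keywords in enumerate(groups)' loop of get_priority
def pvPrioLoop (item_lower : String) : List (Int × List String) → Int
  | [] => (pvGroups.length : Int)            -- 'return len(groups)' after the loop
  | (i, keywords) :: rest =>
      if keywords.any (fun k => PySem.Str.isIn k item_lower) then i
      else pvPrioLoop item_lower rest

def pvGetPriority (item : String) : Int :=
  pvPrioLoop (PySem.Str.lower item) (PySem.List.enumerate pvGroups)

def reorder_subtypes (celltypes : List String) : List String :=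
  PySem.List.sorted2 celltypes pvGetPriority PySem.Str.lower

-- ===== PORT B =====
-- Source B's flat keyword → group-index map
def altPairs : List (String × Nat) :=
  [("exc", 0), ("inh", 1), ("ast", 2), ("opc", 3), ("oli", 4),
   ("mic", 5), ("mg", 5), ("t cells", 5), ("vas", 6), ("endo", 6), ("peri", 6)]

-- Source B's priority: min index among matching keywords, default 7
def altPriority (item : String) : Nat :=
  ((altPairs.filterMap (fun ki =>
      if PySem.Str.isIn ki.1 (PySem.Str.lower item) then some ki.2 else none)).min?).getD 7

def reorder_subtypes_alt (celltypes : List String) : List String :=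
  ((PySem.List.sorted celltypes PySem.Str.lower).foldl
    (fun (bs : List (List String)) x =>
      bs.set (altPriority x) ((bs.getD (altPriority x) []) ++ [x]))
    (List.replicate 8 [])).flatten

-- ===== PRECONDITION & SPEC =====
def Spec_reorder_subtypes (celltypes : List String) (out : List String) : Prop := out = reorder_subtypes_alt celltypes
instance (celltypes : List String) (out : List String) : Decidable (Spec_reorder_subtypes celltypes out) := by unfold Spec_reorder_subtypes; infer_instance

-- ===== CLAIM (what is proved, stated in full; the proofs are below) =====
def Claim_equal_reorder_subtypes : Prop := ∀ (celltypes : List String), Dom_reorder_subtypes celltypes → Spec_reorder_subtypes celltypes (reorder_subtypes celltypes)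

-- ===== LEMMAS AND PROOFS =====

-- filterMap through a pointwise if produces an if-guarded append
theorem filterMap_ite_cons {a b : Type} (P : a → Prop) [DecidablePred P] (g : a → b) (x : a) (l : List a) :
    List.filterMap (fun y => if P y then some (g y) else none) (x :: l) =
      (if P x then [g x] else []) ++ List.filterMap (fun y => if P y then some (g y) else none) l := by
  by_cases h : P x <;> simp [h]

-- A's Int priority is the cast of B's Nat priority
theorem pvGetPriority_eq (item : String) :
    pvGetPriority item = ((altPriority item : Nat) : Int) := by
  unfold pvGetPriority altPriority
  have he : PySem.List.enumerate pvGroups =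
      [((0:Int),["exc"]),(1,["inh"]),(2,["ast"]),(3,["opc"]),(4,["oli"]),
       (5,["mic","mg","t cells"]),(6,["vas","endo","peri"])] := rfl
  rw [he]
  simp only [pvPrioLoop, List.any_cons, List.any_nil, Bool.or_false, altPairs,
    filterMap_ite_cons, List.filterMap_nil, pvGroups, List.length_cons, List.length_nil]
  generalize PySem.Str.isIn "exc" (PySem.Str.lower item) = b0
  generalize PySem.Str.isIn "inh" (PySem.Str.lower item) = b1
  generalize PySem.Str.isIn "ast" (PySem.Str.lower item) = b2
  generalize PySem.Str.isIn "opc" (PySem.Str.lower item) = b3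
  generalize PySem.Str.isIn "oli" (PySem.Str.lower item) = b4
  generalize PySem.Str.isIn "mic" (PySem.Str.lower item) = b5
  generalize PySem.Str.isIn "mg" (PySem.Str.lower item) = b6
  generalize PySem.Str.isIn "t cells" (PySem.Str.lower item) = b7
  generalize PySem.Str.isIn "vas" (PySem.Str.lower item) = b8
  generalize PySem.Str.isIn "endo" (PySem.Str.lower item) = b9
  generalize PySem.Str.isIn "peri" (PySem.Str.lower item) = b10
  revert b0 b1 b2 b3 b4 b5 b6 b7 b8 b9 b10
  decide

theorem altPriority_le (x : String) : altPriority x ≤ 7 := by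
  unfold altPriority
  simp only [altPairs, filterMap_ite_cons, List.filterMap_nil]
  generalize PySem.Str.isIn "exc" (PySem.Str.lower x) = b0
  generalize PySem.Str.isIn "inh" (PySem.Str.lower x) = b1
  generalize PySem.Str.isIn "ast" (PySem.Str.lower x) = b2
  generalize PySem.Str.isIn "opc" (PySem.Str.lower x) = b3
  generalize PySem.Str.isIn "oli" (PySem.Str.lower x) = b4
  generalize PySem.Str.isIn "mic" (PySem.Str.lower x) = b5
  generalize PySem.Str.isIn "mg" (PySem.Str.lower x) = b6
  generalize PySem.Str.isIn "t cells" (PySem.Str.lower x) = b7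
  generalize PySem.Str.isIn "vas" (PySem.Str.lower x) = b8
  generalize PySem.Str.isIn "endo" (PySem.Str.lower x) = b9
  generalize PySem.Str.isIn "peri" (PySem.Str.lower x) = b10
  revert b0 b1 b2 b3 b4 b5 b6 b7 b8 b9 b10
  decide

-- the tuple-key 'before' used by sorted2, expressed through B's Nat priority
def pvBefore (a b : String) : Bool :=
  decide (altPriority a < altPriority b) || (!decide (altPriority b < altPriority a) && decide (PySem.Str.lower a < PySem.Str.lower b))

def pvLowBefore (a b : String) : Bool := decide (PySem.Str.lower a < PySem.Str.lower b)

-- insertBy skips a prefix it is never 'before'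
theorem insertBy_append_left {α : Type} (before : α → α → Bool) (x : α) (A B : List α)
    (h : ∀ y ∈ A, before x y = false) :
    PySem.List.insertBy before x (A ++ B) = A ++ PySem.List.insertBy before x B := by
  induction A with
  | nil => rfl
  | cons a t ih =>
      simp only [List.cons_append, PySem.List.insertBy, h a (by simp), Bool.false_eq_true,
        if_false, List.cons.injEq, true_and]
      exact ih (fun y hy => h y (by simp [hy]))

-- insertBy never passes a suffix it is always 'before'
theorem insertBy_append_right {α : Type} (before : α → α → Bool) (x : α) (A B : List α)
    (h : ∀ y ∈ B, before x y = true) :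
    PySem.List.insertBy before x (A ++ B) = PySem.List.insertBy before x A ++ B := by
  induction A with
  | nil =>
      cases B with
      | nil => rfl
      | cons b t => simp [PySem.List.insertBy, h b (by simp)]
  | cons a t ih =>
      simp only [List.cons_append, PySem.List.insertBy]
      split_ifs with hb
      · rfl
      · simpa using ih

theorem insertBy_congr {α : Type} (before before' : α → α → Bool) (x : α) (A : List α)
    (h : ∀ y ∈ A, before x y = before' x y) :
    PySem.List.insertBy before x A = PySem.List.insertBy before' x A := by
  induction A with
  | nil => rfl
  | cons a t ih =>
      simp only [PySem.List.insertBy, h a (by simp)]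
      rw [ih (fun y hy => h y (by simp [hy]))]

-- inserting x into a concatenation of priority buckets = inserting into x's own bucket by lower
theorem insertBy_flatMap (x : String) (ps : List Nat) (B : Nat → List String)
    (hps : ps.Pairwise (· < ·)) (hmem : altPriority x ∈ ps)
    (hB : ∀ p ∈ ps, ∀ y ∈ B p, altPriority y = p) :
    PySem.List.insertBy pvBefore x (ps.flatMap B) =
      ps.flatMap (fun p => if p = altPriority x then PySem.List.insertBy pvLowBefore x (B p) else B p) := by
  induction ps with
  | nil => cases hmem
  | cons p t ih =>
      have hpt : ∀ q ∈ t, p < q := (List.pairwise_cons.mp hps).1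
      simp only [List.flatMap_cons]
      by_cases hpq : p = altPriority x
      · have hrest : ∀ y ∈ t.flatMap B, pvBefore x y = true := by
          intro y hy
          rcases List.mem_flatMap.mp hy with ⟨q, hq, hyq⟩
          have h1 : altPriority y = q := hB q (by simp [hq]) y hyq
          have h2 : p < q := hpt q hq
          simp only [pvBefore, h1, ← hpq]
          simp; omega
        rw [insertBy_append_right _ _ _ _ hrest]
        have hbk : ∀ y ∈ B p, pvBefore x y = pvLowBefore x y := by
          intro y hy
          have h1 : altPriority y = p := hB p (by simp) y hy
          simp [pvBefore, pvLowBefore, h1, ← hpq]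
        rw [insertBy_congr _ _ _ _ hbk, if_pos hpq]
        congr 1
        apply List.flatMap_congr
        intro q hq
        have h3 := hpt q hq
        rw [if_neg (by omega)]
      · have hq : altPriority x ∈ t := by
          cases hmem with
          | head => exact absurd rfl hpq
          | tail _ h => exact h
        have hbp : ∀ y ∈ B p, pvBefore x y = false := by
          intro y hy
          have h1 : altPriority y = p := hB p (by simp) y hy
          have h2 : p < altPriority x := hpt _ hq
          simp only [pvBefore, h1]
          simp; omega
        rw [insertBy_append_left _ _ _ _ hbp,
            ih (List.Pairwise.of_cons hps) hq (fun q hqt y hy => hB q (by simp [hqt]) y hy)]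
        rw [if_neg hpq]

-- stable sort by lower as a right-append recursion
theorem sorted_append_single (l : List String) (x : String) :
    PySem.List.sorted (l ++ [x]) PySem.Str.lower =
      PySem.List.insertBy pvLowBefore x (PySem.List.sorted l PySem.Str.lower) := by
  rw [PySem.List.sorted_eq_foldl_insertBy, PySem.List.sorted_eq_foldl_insertBy,
      List.foldl_append]
  rfl

-- the bucket decomposition of the tuple-key insertion sort
theorem foldl_insertBy_eq_flatMap (xs : List String) (ps : List Nat)
    (hps : ps.Pairwise (· < ·)) (hx : ∀ x ∈ xs, altPriority x ∈ ps) :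
    xs.foldl (fun acc x => PySem.List.insertBy pvBefore x acc) [] =
      ps.flatMap (fun p =>
        PySem.List.sorted (xs.filter (fun y => altPriority y == p)) PySem.Str.lower) := by
  induction xs using List.reverseRecOn with
  | nil => simp [PySem.List.sorted]
  | append_singleton xs x ih =>
      have hx' : ∀ y ∈ xs, altPriority y ∈ ps := fun y hy => hx y (by simp [hy])
      rw [List.foldl_append, List.foldl_cons, List.foldl_nil,
          ih hx',
          insertBy_flatMap x ps _ hps (hx x (by simp))
            (fun p hp y hy => by
              have h1 := (PySem.List.mem_sorted _ _ _ _).mp hy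
              have h2 := List.mem_filter.mp h1
              simpa using h2.2)]
      apply List.flatMap_congr
      intro p hp
      rw [List.filter_append]
      by_cases hpx : p = altPriority x
      · have : List.filter (fun y => altPriority y == p) [x] = [x] := by simp [hpx]
        rw [this, sorted_append_single, if_pos hpx]
      · have hne : (altPriority x == p) = false := beq_eq_false_iff_ne.mpr (fun h => hpx h.symm)
        have : List.filter (fun y => altPriority y == p) [x] = [] := by
          simp [List.filter, hne]
        rw [this, List.append_nil, if_neg hpx]

-- sorted2 with A's Int key is the foldl of pvBefore insertions
theorem sorted2_eq_foldl (xs : List String) :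
    PySem.List.sorted2 xs pvGetPriority PySem.Str.lower =
      xs.foldl (fun acc x => PySem.List.insertBy pvBefore x acc) [] := by
  show xs.foldl (fun acc x => PySem.List.insertBy
      (fun a b => decide (pvGetPriority a < pvGetPriority b) ||
        (!decide (pvGetPriority b < pvGetPriority a) && decide (PySem.Str.lower a < PySem.Str.lower b)))
      x acc) [] = _
  have hbf : (fun a b => decide (pvGetPriority a < pvGetPriority b) ||
      (!decide (pvGetPriority b < pvGetPriority a) && decide (PySem.Str.lower a < PySem.Str.lower b))) = pvBefore := by
    funext a b
    simp [pvGetPriority_eq, pvBefore]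
  rw [hbf]

-- filtering commutes with one lower-key insertion into a lower-sorted accumulator
theorem filter_insertLow (q : String → Bool) (x : String) (acc : List String)
    (hacc : acc.Pairwise (fun a b => PySem.Str.lower a ≤ PySem.Str.lower b)) :
    (PySem.List.insertBy pvLowBefore x acc).filter q =
      if q x then PySem.List.insertBy pvLowBefore x (acc.filter q) else acc.filter q := by
  induction acc with
  | nil => cases hq : q x <;> simp [PySem.List.insertBy, hq]
  | cons a t ih =>
      have hat : ∀ y ∈ t, PySem.Str.lower a ≤ PySem.Str.lower y := (List.pairwise_cons.mp hacc).1
      simp only [PySem.List.insertBy]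
      by_cases hxa : pvLowBefore x a = true
      · rw [if_pos hxa]
        have hall : ∀ y ∈ (a :: t).filter q, pvLowBefore x y = true := by
          intro y hy
          have hmem := List.mem_filter.mp hy
          have hle : PySem.Str.lower a ≤ PySem.Str.lower y := by
            rcases hmem.1 with _ | hyt
            · exact le_refl _
            · exact hat _ ‹y ∈ t›
          simp only [pvLowBefore, decide_eq_true_eq] at hxa ⊢
          exact lt_of_lt_of_le hxa hle
        rcases hf : (a :: t).filter q with _ | ⟨b, l⟩
        · simp only [List.filter_cons]
          split_ifs with hqx hqa hqa <;> simp_all [PySem.List.insertBy]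
        · have hb : pvLowBefore x b = true := hall b (by rw [hf]; exact List.mem_cons_self)
          simp only [List.filter_cons] at hf ⊢
          split_ifs with hqx <;> simp_all [PySem.List.insertBy]
      · rw [if_neg hxa]
        have ih' := ih (List.Pairwise.of_cons hacc)
        simp only [List.filter_cons]
        by_cases hqa : q a = true
        · simp only [hqa, if_pos]
          by_cases hqx : q x = true
          · simp only [hqx, if_pos] at ih' ⊢
            simp [PySem.List.insertBy, hxa, ih']
          · simp only [hqx] at ih' ⊢
            simp [ih']
        · simp only [hqa]
          by_cases hqx : q x = true <;> simp_all
-- filtering commutes with the stable sort by lower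
theorem filter_sorted (q : String → Bool) (l : List String) :
    (PySem.List.sorted l PySem.Str.lower).filter q =
      PySem.List.sorted (l.filter q) PySem.Str.lower := by
  induction l using List.reverseRecOn with
  | nil => rfl
  | append_singleton l x ih =>
      rw [sorted_append_single, List.filter_append,
          filter_insertLow q x _ (PySem.List.sorted_pairwise l PySem.Str.lower)]
      by_cases hqx : q x = true
      · have : List.filter q [x] = [x] := by simp [hqx]
        rw [this, sorted_append_single, ih, if_pos hqx]
      · have : List.filter q [x] = [] := by simp [List.filter, Bool.eq_false_iff.mpr hqx]
        rw [this, List.append_nil, ih]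
        simp [hqx]

-- setting one cell of a mapped range rewrites the function at that index
theorem set_map_range {α : Type} (n : Nat) (f : Nat → α) (j : Nat) (v : α) :
    ((List.range n).map f).set j v = (List.range n).map (fun p => if p = j then v else f p) := by
  apply List.ext_getElem
  · simp
  · intro i h1 h2
    simp only [List.getElem_set, List.getElem_map, List.getElem_range]
    rcases eq_or_ne j i with h | h
    · simp [h]
    · simp [h, Ne.symm h]

-- B's distribution fold builds, bucket by bucket, the per-priority filters of its input
theorem foldl_buckets (s : List String) (f : Nat → List String) :
    s.foldl (fun (bs : List (List String)) x =>
        bs.set (altPriority x) ((bs.getD (altPriority x) []) ++ [x]))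
      ((List.range 8).map f) =
      (List.range 8).map (fun p => f p ++ s.filter (fun x => altPriority x == p)) := by
  induction s generalizing f with
  | nil => simp
  | cons x t ih =>
      have hj : altPriority x < 8 := by have := altPriority_le x; omega
      have hget : ((List.range 8).map f).getD (altPriority x) [] = f (altPriority x) := by
        rw [List.getD_eq_getElem?_getD]
        simp [hj]
      rw [List.foldl_cons, hget, set_map_range 8 f (altPriority x)]
      have hfe : (fun p => if p = altPriority x then f (altPriority x) ++ [x] else f p) =
          (fun p => f p ++ (if altPriority x == p then [x] else [])) := by
        funext p
        by_cases hp : p = altPriority x <;> simp [hp]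
        · intro h; exact absurd h.symm hp
      rw [hfe, ih]
      apply List.map_congr_left
      intro p hp
      simp only [List.filter_cons]
      by_cases hpx : (altPriority x == p) = true <;> simp [hpx, List.append_assoc]

-- ===== VERDICT (by name: the statement is the Claim_ definition above) =====
theorem reorder_subtypes_spec : Claim_equal_reorder_subtypes := by
  intro celltypes _
  show reorder_subtypes celltypes = reorder_subtypes_alt celltypes
  unfold reorder_subtypes reorder_subtypes_alt
  rw [sorted2_eq_foldl,
      foldl_insertBy_eq_flatMap celltypes (List.range 8) List.pairwise_lt_range
        (fun x _ => List.mem_range.mpr (by have := altPriority_le x; omega))]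
  have hrep : (List.replicate 8 ([] : List String)) = (List.range 8).map (fun _ => []) := by decide
  rw [hrep, foldl_buckets]
  simp only [List.nil_append, List.flatMap]
  congr 1
  apply List.map_congr_left
  intro p hp
  rw [filter_sorted]
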